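-- pv_equiv track=rewrite | github.com/crisbop21/port_new | src/parser.py | _split_accounts
-- ===== SOURCE A (Python) =====
-- def _split_accounts(rows: list[list[str]]) -> list[list[list[str]]]:
--     """Split rows into per-account groups using 'Account Information' markers."""
--     account_starts: list[int] = []
--     for i, row in enumerate(rows):
--         if row and row[0] and row[0].strip() == "Account Information":
--             account_starts.append(i)
--
--     if not account_starts:
--         return [rows]
--
--     groups: list[list[list[str]]] = []
--     for idx, start in enumerate(account_starts):
--         end = account_starts[idx + 1] if idx + 1 < len(account_starts) else len(rows)
--         groups.append(rows[start:end])
--     return groups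
-- ===== SOURCE B (Python) =====
-- def _split_accounts(rows: list[list[str]]) -> list[list[list[str]]]:
--     """Single pass: maintain the currently open group; rows before the first marker are dropped."""
--     groups: list[list[list[str]]] = []
--     current = None
--     for row in rows:
--         if row and row[0].strip() == "Account Information":
--             if current is not None:
--                 groups.append(current)
--             current = [row]
--         elif current is not None:
--             current.append(row)
--     if current is not None:
--         groups.append(current)
--     if not groups:
--         return [rows]
--     return groups
-- ===== Notes on version B (the rewrite author's own statement) =====
-- stated objective: simpler
-- what changed: Replaces A's two-pass index collection plus slicing with a single left-to-right pass that maintains the currently open group and a list of finished groups.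
import Mathlib
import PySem

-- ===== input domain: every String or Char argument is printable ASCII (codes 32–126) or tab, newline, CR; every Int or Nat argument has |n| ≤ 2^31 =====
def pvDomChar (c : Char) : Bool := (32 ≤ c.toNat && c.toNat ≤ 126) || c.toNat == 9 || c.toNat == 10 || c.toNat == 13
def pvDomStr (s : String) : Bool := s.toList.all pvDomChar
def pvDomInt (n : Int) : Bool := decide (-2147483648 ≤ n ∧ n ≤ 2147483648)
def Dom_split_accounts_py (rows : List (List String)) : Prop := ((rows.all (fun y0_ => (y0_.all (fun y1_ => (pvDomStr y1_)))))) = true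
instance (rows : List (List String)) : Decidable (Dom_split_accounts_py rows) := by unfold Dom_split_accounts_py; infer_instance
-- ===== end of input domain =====

-- B replaces A's two passes (collect marker indices, then slice) by one pass that keeps the
-- currently open group; same return values, objective: simpler.

-- ===== PORT A =====
-- row and row[0] and row[0].strip() == "Account Information"
def pvMarkerA (row : List String) : Bool :=
  match row with
  | [] => false
  | h :: _ => (h != "") && (PySem.Str.strip h == "Account Information")

def split_accounts_py (rows : List (List String)) : List (List (List String)) :=
  let account_starts : List Int :=
    (PySem.List.enumerate rows).foldl
      (fun acc p => if pvMarkerA p.2 then acc ++ [p.1] else acc) []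
  if account_starts = [] then [rows]
  else
    (PySem.List.enumerate account_starts).foldl
      (fun groups p =>
        groups ++ [PySem.List.slice rows (some p.2)
          (some (if p.1 + 1 < (account_starts.length : Int)
                 then PySem.List.pyGetD account_starts (p.1 + 1) 0
                 else (rows.length : Int)))]) []

-- ===== PORT B =====
-- row and row[0].strip() == "Account Information"
def pvMarkerB (row : List String) : Bool :=
  match row with
  | [] => false
  | h :: _ => PySem.Str.strip h == "Account Information"

-- one iteration of B's loop: close the current group on a marker, else extend it
def pvStep (st : List (List (List String)) × Option (List (List String)))
    (row : List String) : List (List (List String)) × Option (List (List String)) :=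
  if pvMarkerB row then
    ((match st.2 with | none => st.1 | some c => st.1 ++ [c]), some [row])
  else
    match st.2 with
    | none => st
    | some c => (st.1, some (c ++ [row]))

-- after the loop: append the still-open group, if any
def pvFlush (st : List (List (List String)) × Option (List (List String))) :
    List (List (List String)) :=
  match st.2 with | none => st.1 | some c => st.1 ++ [c]

def split_accounts_py_alt (rows : List (List String)) : List (List (List String)) :=
  let groups := pvFlush (rows.foldl pvStep ([], none))
  if groups = [] then [rows] else groups

-- ===== PRECONDITION & SPEC =====
def Spec_split_accounts_py (rows : List (List String)) (out : List (List (List String))) : Prop := out = split_accounts_py_alt rows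
instance (rows : List (List String)) (out : List (List (List String))) : Decidable (Spec_split_accounts_py rows out) := by unfold Spec_split_accounts_py; infer_instance

-- ===== CLAIM (what is proved, stated in full; the proofs are below) =====
def Claim_equal_split_accounts_py : Prop := ∀ (rows : List (List String)), Dom_split_accounts_py rows → Spec_split_accounts_py rows (split_accounts_py rows)

-- ===== LEMMAS AND PROOFS =====

-- the two marker tests agree (row[0] = "" strips to "", which is not the marker)
lemma marker_eq (row : List String) : pvMarkerA row = pvMarkerB row := by
  cases row with
  | nil => rfl
  | cons h t =>
    by_cases hh : h = ""
    · subst hh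
      have hs : (PySem.Str.strip "" == "Account Information") = false := by decide
      simp [pvMarkerA, pvMarkerB, hs]
    · simp [pvMarkerA, pvMarkerB, hh]

-- marker positions (as Nat offsets), structurally
def pvS (rows : List (List String)) : List Nat :=
  match rows with
  | [] => []
  | r :: rs =>
    if pvMarkerB r then 0 :: (pvS rs).map (fun n => n + 1)
    else (pvS rs).map (fun n => n + 1)

-- A's grouping, expressed with Nat drop/take
def pvAgrp (rows : List (List String)) : List (List (List String)) :=
  List.zipWith (fun s e => ((rows.drop s).take (e - s))) (pvS rows)
    ((pvS rows).tail ++ [rows.length])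

-- B's loop, structurally: open group c, remaining rows
def pvH : List (List String) → List (List String) → List (List (List String))
  | c, [] => [c]
  | c, r :: rs => if pvMarkerB r then c :: pvH [r] rs else pvH (c ++ [r]) rs

def pvH0 : List (List String) → List (List (List String))
  | [] => []
  | r :: rs => if pvMarkerB r then pvH [r] rs else pvH0 rs

lemma enum_filter (rows : List (List String)) : ∀ (s : Nat),
    (((PySem.List.enumerate rows (s : Int)).filter (fun p => pvMarkerA p.2)).map (·.1))
      = (pvS rows).map (fun n => ((s + n : Nat) : Int)) := by
  induction rows with
  | nil => intro s; simp [PySem.List.enumerate_nil, pvS]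
  | cons r rs ih =>
    intro s
    have hcast : ((s : Int) + 1) = ((s + 1 : Nat) : Int) := by push_cast; ring
    rw [PySem.List.enumerate_cons, hcast]
    by_cases h : pvMarkerA r
    · have hB : pvMarkerB r = true := by rw [← marker_eq]; exact h
      simp only [List.filter_cons, h, if_true, List.map_cons, pvS, hB]
      rw [ih (s + 1)]
      simp [List.map_map, Function.comp]
      intro n _
      ring
    · have hB : pvMarkerB r = false := by rw [← marker_eq]; exact (Bool.not_eq_true _).mp h
      simp only [List.filter_cons, h, pvS, hB]
      simp only [Bool.false_eq_true, if_false]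
      rw [ih (s + 1)]
      rw [List.map_map]
      apply List.map_congr_left; intro n _; simp [Function.comp]; ring

lemma loop2 (rows : List (List String)) (l0 : List Int) :
    ∀ (l : List Int) (s : Nat) (acc : List (List (List String))), l0.drop s = l →
    List.foldl (fun groups p =>
        groups ++ [PySem.List.slice rows (some p.2)
          (some (if p.1 + 1 < (l0.length : Int)
                 then PySem.List.pyGetD l0 (p.1 + 1) 0
                 else (rows.length : Int)))]) acc (PySem.List.enumerate l (s : Int))
      = acc ++ List.zipWith (fun a b => PySem.List.slice rows (some a) (some b)) l
          (l.tail ++ [(rows.length : Int)]) := by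
  intro l
  induction l with
  | nil => intro s acc _; simp [PySem.List.enumerate_nil]
  | cons a l' ih =>
    intro s acc hdrop
    have hcast : ((s : Int) + 1) = ((s + 1 : Nat) : Int) := by push_cast; ring
    have hdrop' : l0.drop (s + 1) = l' := by
      rw [← List.tail_drop, hdrop, List.tail_cons]
    rw [PySem.List.enumerate_cons, List.foldl_cons, hcast]
    cases l' with
    | nil =>
      have hl : l0.length = s + 1 := by
        have h1 := congrArg List.length hdrop
        have h2 := congrArg List.length hdrop'
        simp at h1 h2; omega
      have hcond : ¬ (((s + 1 : Nat) : Int) < (l0.length : Int)) := by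
        rw [hl]; push_cast; omega
      rw [if_neg hcond, ih (s+1) _ hdrop']
      simp
    | cons b t =>
      have hl : s + 1 < l0.length := by
        have h2 := congrArg List.length hdrop'
        simp at h2; omega
      have hcond : (((s + 1 : Nat) : Int) < (l0.length : Int)) := by push_cast; omega
      have hgetD : PySem.List.pyGetD l0 ((s + 1 : Nat) : Int) 0 = b := by
        rw [PySem.List.pyGetD_natCast]
        have h0 : l0[s+1]? = some b := by
          have : (l0.drop (s+1))[0]? = some b := by rw [hdrop']; rfl
          simpa [List.getElem?_drop] using this
        simp [List.getD_eq_getElem?_getD, h0]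
      rw [if_pos hcond, hgetD, ih (s+1) _ hdrop']
      simp

lemma zipcast (rows : List (List String)) :
    List.zipWith (fun a b => PySem.List.slice rows (some a) (some b))
      ((pvS rows).map (fun (n : Nat) => (n : Int)))
      (((pvS rows).map (fun (n : Nat) => (n : Int))).tail ++ [(rows.length : Int)])
      = pvAgrp rows := by
  have h2 : (((pvS rows).map (fun (n : Nat) => (n : Int))).tail ++ [(rows.length : Int)])
      = ((pvS rows).tail ++ [rows.length]).map (fun (n : Nat) => (n : Int)) := by
    rw [List.map_append, List.map_tail]
    rfl
  rw [h2, List.zipWith_map]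
  unfold pvAgrp
  simp only [PySem.List.slice_natCast]

lemma zipShift (r : List String) (rs : List (List String)) (l : List Nat) :
    List.zipWith (fun s e => (((r :: rs).drop s).take (e - s))) (l.map (fun n => n + 1))
      ((l.map (fun n => n + 1)).tail ++ [rs.length + 1])
      = List.zipWith (fun s e => ((rs.drop s).take (e - s))) l (l.tail ++ [rs.length]) := by
  have h2 : ((l.map (fun n => n + 1)).tail ++ [rs.length + 1])
      = (l.tail ++ [rs.length]).map (fun n => n + 1) := by
    simp [← List.map_tail]
  rw [h2, List.zipWith_map]
  simp [Nat.succ_sub_succ]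

lemma Agrp_cons_neg (r : List String) (rs : List (List String)) (h : pvMarkerB r = false) :
    pvAgrp (r :: rs) = pvAgrp rs := by
  unfold pvAgrp
  simp only [pvS, h, if_neg Bool.false_ne_true, List.length_cons]
  exact zipShift r rs (pvS rs)

lemma Agrp_cons_pos (r : List String) (rs : List (List String)) (h : pvMarkerB r = true) :
    pvAgrp (r :: rs) = (r :: rs.take ((pvS rs).headD rs.length)) :: pvAgrp rs := by
  unfold pvAgrp
  simp only [pvS, h, if_true, List.length_cons]
  cases hS : pvS rs with
  | nil => simp
  | cons a t =>
    simp only [hS, if_true, List.map_cons, List.tail_cons, List.zipWith_cons_cons]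
    congr 1
    · have := zipShift r rs (a :: t)
      simp only [List.map_cons, List.tail_cons] at this
      simpa using this

lemma h_eq (rs : List (List String)) : ∀ c,
    pvH c rs = (c ++ rs.take ((pvS rs).headD rs.length)) :: pvAgrp rs := by
  induction rs with
  | nil => intro c; simp [pvH, pvAgrp, pvS]
  | cons r rs ih =>
    intro c
    by_cases h : pvMarkerB r
    · rw [pvH, if_pos h, ih [r], Agrp_cons_pos r rs h]
      simp [pvS, h]
    · rw [pvH, if_neg h, ih (c ++ [r]), Agrp_cons_neg r rs (by simpa using h)]
      have hhead : ((pvS (r :: rs)).headD (r :: rs).length)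
          = (pvS rs).headD rs.length + 1 := by
        simp only [pvS, if_neg h, List.length_cons]
        cases pvS rs <;> simp
      rw [hhead]
      simp [List.take_succ_cons]

lemma h0_eq (rs : List (List String)) : pvH0 rs = pvAgrp rs := by
  induction rs with
  | nil => simp [pvH0, pvAgrp, pvS]
  | cons r rs ih =>
    by_cases h : pvMarkerB r
    · rw [pvH0, if_pos h, h_eq rs [r], Agrp_cons_pos r rs h]
      simp
    · rw [pvH0, if_neg h, ih, Agrp_cons_neg r rs (by simpa using h)]

lemma S_nil_iff_Agrp_nil (rows : List (List String)) : pvS rows = [] ↔ pvAgrp rows = [] := by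
  unfold pvAgrp
  cases pvS rows <;> simp

lemma foldB (rs : List (List String)) :
    ∀ (gs : List (List (List String))) (cur : Option (List (List String))),
    pvFlush (rs.foldl pvStep (gs, cur))
      = gs ++ (match cur with | none => pvH0 rs | some c => pvH c rs) := by
  induction rs with
  | nil => intro gs cur; cases cur <;> simp [pvFlush, pvH0, pvH]
  | cons r rs ih =>
    intro gs cur
    simp only [List.foldl_cons]
    by_cases h : pvMarkerB r
    · cases cur with
      | none =>
        rw [show pvStep (gs, none) r = (gs, some [r]) from by simp [pvStep, h]]
        rw [ih gs (some [r])]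
        simp [pvH0, h]
      | some c =>
        rw [show pvStep (gs, some c) r = (gs ++ [c], some [r]) from by simp [pvStep, h]]
        rw [ih (gs ++ [c]) (some [r])]
        simp [pvH, h]
    · cases cur with
      | none =>
        rw [show pvStep (gs, none) r = (gs, none) from by simp [pvStep, h]]
        rw [ih gs none]
        simp [pvH0, h]
      | some c =>
        rw [show pvStep (gs, some c) r = (gs, some (c ++ [r])) from by simp [pvStep, h]]
        rw [ih gs (some (c ++ [r]))]
        simp [pvH, h]

lemma portA_eq (rows : List (List String)) :
    split_accounts_py rows = if pvS rows = [] then [rows] else pvAgrp rows := by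
  have hstarts : (PySem.List.enumerate rows).foldl
      (fun acc p => if pvMarkerA p.2 then acc ++ [p.1] else acc) ([] : List Int)
      = (pvS rows).map (fun (n : Nat) => (n : Int)) := by
    rw [PySem.List.foldl_append_if, List.nil_append]
    have h := enum_filter rows 0
    simp only [Nat.cast_zero] at h
    rw [h]
    apply List.map_congr_left; intro n _; simp
  unfold split_accounts_py
  rw [hstarts]
  by_cases hS : pvS rows = []
  · simp [hS]
  · have hne : (pvS rows).map (fun (n : Nat) => (n : Int)) ≠ [] := by
      simpa using hS
    rw [if_neg hne, if_neg hS]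
    have hl := loop2 rows ((pvS rows).map (fun (n : Nat) => (n : Int)))
      ((pvS rows).map (fun (n : Nat) => (n : Int))) 0 [] rfl
    simp only [Nat.cast_zero] at hl
    rw [hl, List.nil_append]
    exact zipcast rows

lemma portB_eq (rows : List (List String)) :
    split_accounts_py_alt rows = if pvH0 rows = [] then [rows] else pvH0 rows := by
  unfold split_accounts_py_alt
  rw [show pvFlush (rows.foldl pvStep ([], none)) = pvH0 rows from by
    simpa using foldB rows [] none]

-- ===== VERDICT (by name: the statement is the Claim_ definition above) =====
theorem split_accounts_py_spec : Claim_equal_split_accounts_py := by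
  intro rows _
  unfold Spec_split_accounts_py
  rw [portA_eq, portB_eq, h0_eq]
  by_cases hS : pvS rows = []
  · rw [if_pos hS, if_pos ((S_nil_iff_Agrp_nil rows).mp hS)]
  · rw [if_neg hS, if_neg (fun hA => hS ((S_nil_iff_Agrp_nil rows).mpr hA))]
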